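-- pv_equiv track=rewrite | github.com/Axel0624/AxelAragon | Cheating Hangman/CheatingHangman.py | max_partition
-- ===== SOURCE A (Python) =====
-- def max_partition(partitions):
--     """Returns the hint for the largest partite set
--
--     The maximum partite set is selected by selecting the partite set with
--     1. The maximum size partite set
--     2. If more than one maximum, prefer the hint with fewer revealed letters
--     3. If there is still a tie, select randomly
--
--     Args:
--         partitions (dict): partitions from partition function
--
--     Returns:
--         str: hint for the largest partite set
--     """
--     max_size = 0
--     max_hint = None
--
--     for hint, words in partitions.items():
--         size = len(words)
--         if size > max_size:
--             max_size = size
--             max_hint = hint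
--         elif size == max_size and max_hint and hint.count("-") < max_hint.count("-"):
--             max_hint = hint
--
--     return max_hint
-- ===== SOURCE B (Python) =====
-- def max_partition(partitions):
--     """Hint of the largest partition, preferring fewer '-' on size ties.
--
--     Sorts the items once by (-size, dash-count); stability keeps the
--     first-seen winner among exact ties. Returns None when there is no
--     partition with at least one word.
--     """
--     ranked = sorted(partitions.items(), key=lambda kv: (-len(kv[1]), kv[0].count("-")))
--     if ranked and ranked[0][1]:
--         return ranked[0][0]
--     return None
-- ===== Notes on version B (the rewrite author's own statement) =====
-- stated objective: alternative
-- what changed: Replaces A's single tracking loop (running max-size with in-loop dash tie-break) by one stable sort of the items under the key (-size, dash-count) followed by inspecting the head, returning None when the head's word list is empty.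
import Mathlib
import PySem

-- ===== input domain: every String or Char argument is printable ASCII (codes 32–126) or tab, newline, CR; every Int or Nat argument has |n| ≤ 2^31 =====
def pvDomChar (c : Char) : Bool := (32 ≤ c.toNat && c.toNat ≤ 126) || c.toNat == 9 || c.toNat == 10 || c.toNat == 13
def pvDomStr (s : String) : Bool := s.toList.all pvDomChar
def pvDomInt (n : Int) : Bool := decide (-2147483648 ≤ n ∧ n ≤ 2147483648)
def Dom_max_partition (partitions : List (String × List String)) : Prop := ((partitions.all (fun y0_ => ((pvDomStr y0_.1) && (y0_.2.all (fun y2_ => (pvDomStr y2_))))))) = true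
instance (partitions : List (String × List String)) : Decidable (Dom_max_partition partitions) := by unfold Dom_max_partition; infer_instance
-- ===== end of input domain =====

-- B replaces A's single tracking loop by one stable sort on the key (-size, dash-count) and a look at the head (objective: alternative decomposition, not faster).

-- ===== PORT A =====
-- literal port of A: fold over the items carrying (max_size, max_hint); truthiness of
-- max_hint (None or "" are falsy) is ported as the explicit mh ≠ "" conjunct.
def max_partition (partitions : List (String × List String)) : Option String :=
  (partitions.foldl
    (fun (st : Int × Option String) kv =>
      let size : Int := PySem.List.len kv.2
      if st.1 < size then (size, some kv.1)
      else if size = st.1 then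
        match st.2 with
        | none => st
        | some mh =>
          if mh ≠ "" ∧ PySem.Str.count kv.1 "-" < PySem.Str.count mh "-" then (st.1, some kv.1)
          else st
      else st)
    ((0 : Int), (none : Option String))).2

-- ===== PORT B =====
-- literal port of Source B: stable sort by (-len(words), hint.count('-')), then the head.
def max_partition_alt (partitions : List (String × List String)) : Option String :=
  let ranked := PySem.List.sorted2 partitions
    (fun kv => -(PySem.List.len kv.2)) (fun kv => PySem.Str.count kv.1 "-")
  match ranked with
  | [] => none
  | (h, ws) :: _ => if ws ≠ [] then some h else none

-- ===== PRECONDITION & SPEC =====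
def Spec_max_partition (partitions : List (String × List String)) (out : Option String) : Prop := out = max_partition_alt partitions
instance (partitions : List (String × List String)) (out : Option String) : Decidable (Spec_max_partition partitions out) := by unfold Spec_max_partition; infer_instance

-- ===== CLAIM (what is proved, stated in full; the proofs are below) =====
def Claim_equal_max_partition : Prop := ∀ (partitions : List (String × List String)), Dom_max_partition partitions → Spec_max_partition partitions (max_partition partitions)

-- ===== LEMMAS AND PROOFS =====

-- A's loop body
def mpStep (st : Int × Option String) (kv : String × List String) : Int × Option String :=
  let size : Int := PySem.List.len kv.2
  if st.1 < size then (size, some kv.1)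
  else if size = st.1 then
    match st.2 with
    | none => st
    | some mh =>
      if mh ≠ "" ∧ PySem.Str.count kv.1 "-" < PySem.Str.count mh "-" then (st.1, some kv.1)
      else st
  else st

-- B's sort order (the 'before' predicate sorted2 inserts with)
def mpBefore (a b : String × List String) : Bool :=
  decide (-(PySem.List.len a.2) < -(PySem.List.len b.2)) ||
    (!decide (-(PySem.List.len b.2) < -(PySem.List.len a.2)) &&
      decide (PySem.Str.count a.1 "-" < PySem.Str.count b.1 "-"))

-- the invariant tying A's loop state to the head of B's sorted list
def mpRel (st : Int × Option String) (s : List (String × List String)) : Prop :=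
  match s with
  | [] => st = (0, none)
  | (h, ws) :: _ => if ws = [] then st = (0, none) else st = ((ws.length : Int), some h)

theorem mp_unfoldA (l : List (String × List String)) :
    max_partition l = (l.foldl mpStep ((0 : Int), (none : Option String))).2 := rfl

theorem mp_sorted2_eq (l : List (String × List String)) :
    PySem.List.sorted2 l (fun kv => -(PySem.List.len kv.2)) (fun kv => PySem.Str.count kv.1 "-")
      = l.foldl (fun acc x => PySem.List.insertBy mpBefore x acc) [] := rfl

theorem mp_count_empty : PySem.Str.count "" "-" = 0 := rfl

theorem mp_count_norm (s : String) :
    PySem.Str.count s "-" = PySem.Chars.count s.toList ['-'] := rfl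

theorem mp_inv (l : List (String × List String)) :
    mpRel (l.foldl mpStep ((0 : Int), (none : Option String)))
      (l.foldl (fun acc x => PySem.List.insertBy mpBefore x acc) []) := by
  induction l using List.reverseRecOn with
  | nil => simp [mpRel]
  | append_singleton l x ih =>
    rw [List.foldl_append, List.foldl_append]
    simp only [List.foldl]
    set st := l.foldl mpStep ((0 : Int), (none : Option String)) with hst
    set s := l.foldl (fun acc x => PySem.List.insertBy mpBefore x acc) [] with hs
    clear_value st s
    clear hst hs
    obtain ⟨hx, wsx⟩ := x
    match s, ih with
    | [], ih =>
      simp only [mpRel] at ih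
      subst ih
      by_cases he : wsx = []
      · subst he
        simp [PySem.List.insertBy, mpStep, mpRel, PySem.List.len]
      · have h0 : (0 : Int) < (wsx.length : Int) := by
          have := List.length_pos_iff.mpr he; omega
        simp only [PySem.List.insertBy, mpStep, mpRel]
        simp [he]
    | (h, ws) :: t, ih =>
      simp only [mpRel] at ih
      by_cases hwse : ws = []
      · -- head has an empty word list: the whole state is (0, none)
        simp only [if_pos hwse] at ih
        subst ih
        subst hwse
        by_cases he : wsx = []
        · subst he
          -- size 0 item: A's state is unchanged; new head still has empty words
          simp only [PySem.List.insertBy, mpStep, mpRel, PySem.List.len]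
          by_cases hb : mpBefore (hx, []) (h, []) = true <;> simp [hb]
        · have h0 : (0 : Int) < (wsx.length : Int) := by
            have := List.length_pos_iff.mpr he; omega
          have hb : mpBefore (hx, wsx) (h, []) = true := by
            simp [mpBefore, PySem.List.len]; omega
          simp only [PySem.List.insertBy, hb, if_pos, mpStep, mpRel]
          simp [he]
      · -- head (h, ws) with ws ≠ []: st = (ws.length, some h)
        simp only [if_neg hwse] at ih
        subst ih
        have hwpos : 0 < ws.length := List.length_pos_iff.mpr hwse
        rcases lt_trichotomy ws.length wsx.length with hlt | heq | hgt
        · -- strictly larger partition: both take x as the new best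
          have hxe : wsx ≠ [] := by
            intro hh; rw [hh] at hlt; simp at hlt
          have hlt' : ((ws.length : Int)) < (wsx.length : Int) := by omega
          have hb : mpBefore (hx, wsx) (h, ws) = true := by
            simp [mpBefore]; omega
          simp only [PySem.List.insertBy, hb, if_pos, mpStep, mpRel]
          simp [hxe, hlt']
        · -- equal size: both switch exactly when x has strictly fewer dashes
          have hxe : wsx ≠ [] := by
            intro hh; rw [hh] at heq; simp only [List.length_nil] at heq; omega
          have hnlt : ¬ ((ws.length : Int)) < (wsx.length : Int) := by omega
          have heq' : ((wsx.length : Int)) = (ws.length : Int) := by omega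
          by_cases hd : PySem.Str.count hx "-" < PySem.Str.count h "-"
          · have hne : h ≠ "" := by
              intro hh; rw [hh, mp_count_empty] at hd; omega
            have hdC := hd
            rw [mp_count_norm hx, mp_count_norm h] at hdC
            have hb : mpBefore (hx, wsx) (h, ws) = true := by
              simp [mpBefore]; omega
            simp only [PySem.List.insertBy, hb, if_pos, mpStep, mpRel]
            simp [heq', hne, hdC, hxe]
          · have hdC := hd
            rw [mp_count_norm hx, mp_count_norm h] at hdC
            have hb : mpBefore (hx, wsx) (h, ws) = false := by
              simp [mpBefore]; omega
            simp only [PySem.List.insertBy, hb, mpStep, mpRel]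
            simp [heq', hdC, hwse]
        · -- strictly smaller partition: nothing changes on either side
          have hnlt : ¬ ((ws.length : Int)) < (wsx.length : Int) := by omega
          have hne2 : ¬ ((wsx.length : Int)) = (ws.length : Int) := by omega
          have hb : mpBefore (hx, wsx) (h, ws) = false := by
            simp [mpBefore]; omega
          simp only [PySem.List.insertBy, hb, mpStep, mpRel]
          simp [hnlt, hne2, hwse]

-- ===== VERDICT (by name: the statement is the Claim_ definition above) =====
theorem max_partition_spec : Claim_equal_max_partition := by
  intro l _
  show max_partition l = max_partition_alt l
  have h := mp_inv l
  rw [mp_unfoldA, max_partition_alt]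
  simp only [mp_sorted2_eq]
  set s := l.foldl (fun acc x => PySem.List.insertBy mpBefore x acc) [] with hs
  clear_value s
  match s, h with
  | [], h => simp only [mpRel] at h; rw [h]
  | (hd, ws) :: t, h =>
    simp only [mpRel] at h
    by_cases hw : ws = []
    · simp only [if_pos hw] at h; rw [h]; simp [hw]
    · simp only [if_neg hw] at h; rw [h]; simp [hw]
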